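-- pv_equiv track=rewrite | github.com/DqkrLord0Xerod/YGO-Database-Project | yugioh_db_generator/ai/rule_generator.py | _generate_timing_rules
-- ===== SOURCE A (Python) =====
-- from typing import List, Dict, Any, Set, Optional
--
-- def _generate_timing_rules(card_name: str, card_text: str, effects: Dict[str, bool], properties: Dict[str, bool]) -> List[str]:
--     """Generate timing and activation rules."""
--     rulings = []
--
--     # Check for activation triggers in the card text
--     has_activation_timing = False
--     activation_triggers = [
--         "when", "if", "during", "at the", "after", "while",
--         "end phase", "start phase", "main phase", "battle phase",
--         "standby phase", "end step", "damage step"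
--     ]
--
--     for trigger in activation_triggers:
--         if trigger in card_text.lower():
--             has_activation_timing = True
--             break
--
--     if has_activation_timing:
--         # Check for common timing patterns
--         if "when" in card_text.lower() and "you can" in card_text.lower():
--             rulings.append(f"The \"When... you can\" effect of {card_name} is an optional trigger effect with a specific timing. It must be activated in the first Chain Link after the condition is met, or you will miss the timing.")
--
--         if "during the damage step" in card_text.lower():
--             rulings.append(f"{card_name} can be activated during the Damage Step, which is unusual as most cards cannot be activated during this step.")
--
--         if "during either player's" in card_text.lower():
--             rulings.append(f"{card_name} can be activated during either player's turn, making it versatile for both offense and defense.")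
--
--     # Add property-based timing rules
--     if properties.get("is_counter_trap", False):
--         rulings.append(f"As a Counter Trap, {card_name} can only be responded to by other Counter Traps due to its Spell Speed 3.")
--
--     return rulings
-- ===== SOURCE B (Python) =====
-- from typing import List, Dict
--
-- def _generate_timing_rules(card_name: str, card_text: str, effects: Dict[str, bool], properties: Dict[str, bool]) -> List[str]:
--     """Generate timing and activation rules (gate-free: each timing pattern already
--     contains a listed trigger word, so the trigger pre-scan of A is redundant)."""
--     text = card_text.lower()
--     rulings = []
--
--     if "when" in text and "you can" in text:
--         rulings.append(f"The \"When... you can\" effect of {card_name} is an optional trigger effect with a specific timing. It must be activated in the first Chain Link after the condition is met, or you will miss the timing.")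
--
--     if "during the damage step" in text:
--         rulings.append(f"{card_name} can be activated during the Damage Step, which is unusual as most cards cannot be activated during this step.")
--
--     if "during either player's" in text:
--         rulings.append(f"{card_name} can be activated during either player's turn, making it versatile for both offense and defense.")
--
--     if properties.get("is_counter_trap", False):
--         rulings.append(f"As a Counter Trap, {card_name} can only be responded to by other Counter Traps due to its Spell Speed 3.")
--
--     return rulings
-- ===== Notes on version B (the rewrite author's own statement) =====
-- stated objective: simpler
-- what changed: B removes A's 13-word activation-trigger pre-scan loop and the has_activation_timing gate entirely (each of the three timing patterns already contains a listed trigger word, so the gate is provably redundant), performing the three substring checks directly on the lowered text.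
import Mathlib
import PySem

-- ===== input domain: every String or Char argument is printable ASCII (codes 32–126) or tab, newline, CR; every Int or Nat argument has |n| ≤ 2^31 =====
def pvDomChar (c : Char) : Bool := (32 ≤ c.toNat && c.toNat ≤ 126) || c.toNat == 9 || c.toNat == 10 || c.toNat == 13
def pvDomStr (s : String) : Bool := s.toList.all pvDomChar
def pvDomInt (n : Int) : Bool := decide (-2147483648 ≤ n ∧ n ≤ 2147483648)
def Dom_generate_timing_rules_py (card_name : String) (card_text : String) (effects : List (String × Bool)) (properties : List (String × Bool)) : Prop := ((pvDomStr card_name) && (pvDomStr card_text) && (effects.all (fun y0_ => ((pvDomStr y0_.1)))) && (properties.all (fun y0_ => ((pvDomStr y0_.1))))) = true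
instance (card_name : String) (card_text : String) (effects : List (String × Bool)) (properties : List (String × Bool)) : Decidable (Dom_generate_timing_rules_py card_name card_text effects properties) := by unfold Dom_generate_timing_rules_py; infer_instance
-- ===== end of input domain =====

-- B drops A's redundant 13-word activation-trigger pre-scan (each timing pattern already
-- contains a listed trigger word), doing the three substring checks directly: simpler.

-- Shared message texts (identical f-strings in both Pythons)
def pvMsg1 (card_name : String) : String :=
  "The \"When... you can\" effect of " ++ card_name ++ " is an optional trigger effect with a specific timing. It must be activated in the first Chain Link after the condition is met, or you will miss the timing."
def pvMsg2 (card_name : String) : String :=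
  card_name ++ " can be activated during the Damage Step, which is unusual as most cards cannot be activated during this step."
def pvMsg3 (card_name : String) : String :=
  card_name ++ " can be activated during either player's turn, making it versatile for both offense and defense."
def pvMsg4 (card_name : String) : String :=
  "As a Counter Trap, " ++ card_name ++ " can only be responded to by other Counter Traps due to its Spell Speed 3."

-- ===== PORT A =====
def pvTriggers : List String :=
  ["when", "if", "during", "at the", "after", "while",
   "end phase", "start phase", "main phase", "battle phase",
   "standby phase", "end step", "damage step"]

def generate_timing_rules_py (card_name : String) (card_text : String) (effects : List (String × Bool)) (properties : List (String × Bool)) : List String :=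
  let lowered := PySem.Str.lower card_text
  -- 'for trigger in activation_triggers: … break' — short-circuit scan
  let has_activation_timing := pvTriggers.any (fun t => PySem.Str.isIn t lowered)
  let rulings : List String := []
  let rulings :=
    if has_activation_timing then
      let rulings := if PySem.Str.isIn "when" lowered && PySem.Str.isIn "you can" lowered
                     then rulings ++ [pvMsg1 card_name] else rulings
      let rulings := if PySem.Str.isIn "during the damage step" lowered
                     then rulings ++ [pvMsg2 card_name] else rulings
      let rulings := if PySem.Str.isIn "during either player's" lowered
                     then rulings ++ [pvMsg3 card_name] else rulings
      rulings
    else rulings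
  if (PySem.Dict.mk properties).getD "is_counter_trap" false
  then rulings ++ [pvMsg4 card_name] else rulings

-- ===== PORT B =====
def generate_timing_rules_py_alt (card_name : String) (card_text : String) (effects : List (String × Bool)) (properties : List (String × Bool)) : List String :=
  let text := PySem.Str.lower card_text
  (if PySem.Str.isIn "when" text && PySem.Str.isIn "you can" text then [pvMsg1 card_name] else []) ++
  (if PySem.Str.isIn "during the damage step" text then [pvMsg2 card_name] else []) ++
  (if PySem.Str.isIn "during either player's" text then [pvMsg3 card_name] else []) ++
  (if (PySem.Dict.mk properties).getD "is_counter_trap" false then [pvMsg4 card_name] else [])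

-- ===== PRECONDITION & SPEC =====
def Spec_generate_timing_rules_py (card_name : String) (card_text : String) (effects : List (String × Bool)) (properties : List (String × Bool)) (out : List String) : Prop := out = generate_timing_rules_py_alt card_name card_text effects properties
instance (card_name : String) (card_text : String) (effects : List (String × Bool)) (properties : List (String × Bool)) (out : List String) : Decidable (Spec_generate_timing_rules_py card_name card_text effects properties out) := by unfold Spec_generate_timing_rules_py; infer_instance

-- ===== CLAIM (what is proved, stated in full; the proofs are below) =====
def Claim_equal_generate_timing_rules_py : Prop := ∀ (card_name : String) (card_text : String) (effects : List (String × Bool)) (properties : List (String × Bool)), Dom_generate_timing_rules_py card_name card_text effects properties → Spec_generate_timing_rules_py card_name card_text effects properties (generate_timing_rules_py card_name card_text effects properties)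

-- ===== LEMMAS AND PROOFS =====

-- If A's trigger scan fails, "when" is not in the text (it is the first listed trigger).
theorem pv_no_when {lt : String} (h : pvTriggers.any (fun t => PySem.Str.isIn t lt) = false) :
    PySem.Str.isIn "when" lt = false := by
  simp [pvTriggers] at h; exact h.1

-- If A's trigger scan fails, neither does any pattern containing the trigger "during".
theorem pv_no_during_pat {lt : String} (sub : String)
    (hsub : "during".toList <:+: sub.toList)
    (h : pvTriggers.any (fun t => PySem.Str.isIn t lt) = false) :
    PySem.Str.isIn sub lt = false := by
  simp [pvTriggers] at h
  have hdur : PySem.Str.isIn "during" lt = false := h.2.2.1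
  rw [← Bool.not_eq_true] at hdur ⊢
  rw [PySem.Str.isIn_iff_infix] at hdur ⊢
  exact fun hc => hdur (hsub.trans hc)

-- ===== VERDICT (by name: the statement is the Claim_ definition above) =====
theorem generate_timing_rules_py_spec : Claim_equal_generate_timing_rules_py := by
  intro card_name card_text effects properties _
  unfold Spec_generate_timing_rules_py generate_timing_rules_py generate_timing_rules_py_alt
  by_cases h : pvTriggers.any (fun t => PySem.Str.isIn t (PySem.Str.lower card_text)) = true
  · simp only [h, if_true]
    split_ifs <;> simp
  · rw [Bool.not_eq_true] at h
    have h1 := pv_no_when h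
    have h2 := pv_no_during_pat "during the damage step" (by decide) h
    have h3 := pv_no_during_pat "during either player's" (by decide) h
    simp only [h, h1, h2, h3, Bool.false_and, if_false]
    split_ifs <;> simp
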